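-- pv_equiv track=rewrite | github.com/Jamtit/PSI-2022-GR3 | main.py | calculateRoofWithGapsFromEdge
-- ===== SOURCE A (Python) =====
-- gapFromRoofEdges = 15
--
-- def calculateRoofWithGapsFromEdge(originalRoof):
--   for j in range(0, 2):
--     for i in range(0,4):
--       if(j == 0 ):
--         if(i < 2):
--           originalRoof[i][j] = originalRoof[i][j] + gapFromRoofEdges
--         else: originalRoof[i][j] = originalRoof[i][j] - gapFromRoofEdges
--       else:
--         if(i % 3 == 0):
--           originalRoof[i][j] = originalRoof[i][j] + gapFromRoofEdges
--         else:
--           originalRoof[i][j] = originalRoof[i][j] - gapFromRoofEdges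
--
--   return originalRoof
-- ===== SOURCE B (Python) =====
-- gapFromRoofEdges = 15
--
-- def calculateRoofWithGapsFromEdge(originalRoof):
--   deltas = [(gapFromRoofEdges, gapFromRoofEdges),
--             (gapFromRoofEdges, -gapFromRoofEdges),
--             (-gapFromRoofEdges, -gapFromRoofEdges),
--             (-gapFromRoofEdges, gapFromRoofEdges)]
--   for i, (d0, d1) in enumerate(deltas):
--     originalRoof[i][0] += d0
--     originalRoof[i][1] += d1
--   return originalRoof
-- ===== Notes on version B (the rewrite author's own statement) =====
-- stated objective: simpler
-- what changed: Replaced the nested j/i loops with if/else branch logic by a fixed 4x2 table of signed offsets applied in a single enumerate pass.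
-- outside the precondition, e.g. on calculateRoofWithGapsFromEdge([[1, 2], [3, 4], [5, 6]]): A raises IndexError, B raises IndexError
import Mathlib
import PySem

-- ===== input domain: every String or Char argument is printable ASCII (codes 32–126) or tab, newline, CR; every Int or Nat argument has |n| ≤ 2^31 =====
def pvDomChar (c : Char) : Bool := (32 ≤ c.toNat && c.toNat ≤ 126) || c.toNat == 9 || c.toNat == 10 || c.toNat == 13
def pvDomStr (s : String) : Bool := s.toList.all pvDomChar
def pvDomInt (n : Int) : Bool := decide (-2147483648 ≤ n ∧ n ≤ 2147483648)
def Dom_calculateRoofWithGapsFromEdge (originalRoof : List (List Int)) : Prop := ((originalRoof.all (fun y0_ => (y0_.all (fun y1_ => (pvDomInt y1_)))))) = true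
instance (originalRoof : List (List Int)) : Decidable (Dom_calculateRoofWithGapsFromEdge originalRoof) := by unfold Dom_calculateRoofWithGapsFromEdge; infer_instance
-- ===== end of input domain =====

-- B replaces A's nested loops with branch conditions by a fixed 4×2 table of signed
-- offsets added in a single enumerate pass (objective: simpler). Note: the Python A
-- mutates originalRoof in place and returns it; B performs the same mutation; the
-- equivalence proved here is about the return value.

-- ===== PORT A =====
-- originalRoof[i][j] += d, exact for in-range indices (guaranteed by Pre_);
-- Python would raise IndexError out of range, excluded by Pre_.
def pvAdd2 (st : List (List Int)) (i j : Nat) (d : Int) : List (List Int) :=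
  st.set i ((st.getD i []).set j ((st.getD i []).getD j 0 + d))

def calculateRoofWithGapsFromEdge (originalRoof : List (List Int)) : List (List Int) :=
  (PySem.List.pyRange 0 2 1).foldl (fun st j =>
    (PySem.List.pyRange 0 4 1).foldl (fun st i =>
      if j == 0 then
        if i < 2 then pvAdd2 st i.toNat j.toNat 15
        else pvAdd2 st i.toNat j.toNat (-15)
      else
        if i % 3 == 0 then pvAdd2 st i.toNat j.toNat 15
        else pvAdd2 st i.toNat j.toNat (-15)) st) originalRoof

-- ===== PORT B =====
def pvDeltas : List (Int × Int) := [(15, 15), (15, -15), (-15, -15), (-15, 15)]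

def calculateRoofWithGapsFromEdge_alt (originalRoof : List (List Int)) : List (List Int) :=
  (PySem.List.enumerate pvDeltas).foldl (fun st p =>
    pvAdd2 (pvAdd2 st p.1.toNat 0 p.2.1) p.1.toNat 1 p.2.2) originalRoof

-- ===== PRECONDITION & SPEC =====
-- Pre_ excludes inputs on which Python A raises IndexError: fewer than 4 rows, or one
-- of the first 4 rows shorter than 2.
def Pre_calculateRoofWithGapsFromEdge (originalRoof : List (List Int)) : Prop :=
  4 ≤ originalRoof.length ∧ ∀ r ∈ originalRoof.take 4, 2 ≤ r.length
instance (originalRoof : List (List Int)) : Decidable (Pre_calculateRoofWithGapsFromEdge originalRoof) := by unfold Pre_calculateRoofWithGapsFromEdge; infer_instance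

def pvWitness_calculateRoofWithGapsFromEdge : List (List Int) :=
  [[1, 2], [3, 4], [5, 6], [7, 8]]

def Spec_calculateRoofWithGapsFromEdge (originalRoof : List (List Int)) (out : List (List Int)) : Prop := out = calculateRoofWithGapsFromEdge_alt originalRoof
instance (originalRoof : List (List Int)) (out : List (List Int)) : Decidable (Spec_calculateRoofWithGapsFromEdge originalRoof out) := by unfold Spec_calculateRoofWithGapsFromEdge; infer_instance

-- ===== CLAIM (what is proved, stated in full; the proofs are below) =====
def Claim_equal_calculateRoofWithGapsFromEdge : Prop := ∀ (originalRoof : List (List Int)), Dom_calculateRoofWithGapsFromEdge originalRoof → Pre_calculateRoofWithGapsFromEdge originalRoof → Spec_calculateRoofWithGapsFromEdge originalRoof (calculateRoofWithGapsFromEdge originalRoof)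

-- ===== LEMMAS AND PROOFS =====

-- ===== VERDICT (by name: the statement is the Claim_ definition above) =====
theorem calculateRoofWithGapsFromEdge_spec : Claim_equal_calculateRoofWithGapsFromEdge := by
  intro roof _ hpre
  obtain ⟨hlen, hrows⟩ := hpre
  match roof, hlen with
  | r0 :: r1 :: r2 :: r3 :: rest, _ =>
    have h0 : 2 ≤ r0.length := hrows r0 (by simp)
    have h1 : 2 ≤ r1.length := hrows r1 (by simp)
    have h2 : 2 ≤ r2.length := hrows r2 (by simp)
    have h3 : 2 ≤ r3.length := hrows r3 (by simp)
    match r0, h0 with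
    | a0 :: b0 :: t0, _ =>
    match r1, h1 with
    | a1 :: b1 :: t1, _ =>
    match r2, h2 with
    | a2 :: b2 :: t2, _ =>
    match r3, h3 with
    | a3 :: b3 :: t3, _ =>
      simp [Spec_calculateRoofWithGapsFromEdge, calculateRoofWithGapsFromEdge,
        calculateRoofWithGapsFromEdge_alt, pvAdd2, pvDeltas, PySem.List.enumerate,
        PySem.List.pyRange, List.range_succ]
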